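-- pv_equiv track=rewrite | github.com/sdcst12-students/b200-FishMansss | 200a-Review.py | getMerge
-- ===== SOURCE A (Python) =====
-- def getMerge(list1,list2):
--     # list 1: expected list or tuple
--     # list 2: expected list or tuple
--     # add the elements of list2 into list1
--     # if the list2 element is in list1, add it at the position where it occurs in list1
--     # if the list2 element is not in list1, add it to the end
--     for i in list2:
--         if list1.count(i) == 0:
--             list1.append(i)
--         else:
--             pos = list1.index(i)
--             list1.insert(pos, i)
--
--     return list1
-- ===== SOURCE B (Python) =====
-- def getMerge(list1, list2):
--     # Single pass: count copies per value, rebuild list1 with extras before each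
--     # first occurrence, then append blocks for values new to list1 (mutates list1 like A).
--     cnt = {}
--     for v in list2:
--         cnt[v] = cnt.get(v, 0) + 1
--     in1 = set(list1)
--     merged = []
--     seen = set()
--     for x in list1:
--         if x not in seen:
--             seen.add(x)
--             merged.extend([x] * cnt.get(x, 0))
--         merged.append(x)
--     seen2 = set()
--     for v in list2:
--         if v not in in1 and v not in seen2:
--             seen2.add(v)
--             merged.extend([v] * cnt[v])
--     list1[:] = merged
--     return list1
-- ===== Notes on version B (the rewrite author's own statement) =====
-- stated objective: faster
-- what changed: A rescans list1 with count/index/insert for every element of list2 (quadratic); B makes one counting pass over list2 and one rebuild pass over list1 (plus one pass for appended values), inserting all extra copies at once.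
import Mathlib
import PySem

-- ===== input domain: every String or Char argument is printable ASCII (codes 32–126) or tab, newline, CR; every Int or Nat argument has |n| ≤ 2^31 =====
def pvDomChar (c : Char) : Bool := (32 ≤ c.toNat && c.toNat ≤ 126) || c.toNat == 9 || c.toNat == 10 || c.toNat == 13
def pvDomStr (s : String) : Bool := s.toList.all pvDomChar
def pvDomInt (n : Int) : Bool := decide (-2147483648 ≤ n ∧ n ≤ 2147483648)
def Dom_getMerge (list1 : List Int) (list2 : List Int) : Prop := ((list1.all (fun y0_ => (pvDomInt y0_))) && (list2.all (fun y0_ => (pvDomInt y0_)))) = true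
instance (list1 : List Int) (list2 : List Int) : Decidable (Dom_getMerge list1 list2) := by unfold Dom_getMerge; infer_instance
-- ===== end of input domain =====

-- B replaces A's per-element count/index/insert rescans by one counting pass and one
-- rebuild pass (objective: faster, asymptotic). Equivalence is about the RETURN value;
-- both A and B also mutate list1 in place in Python (B via list1[:] = ...).

-- ===== PORT A =====
-- one iteration of A's 'for i in list2' body
def getMergeStep (l : List Int) (i : Int) : List Int :=
  if PySem.List.count l i = 0 then
    l ++ [i]
  else
    match PySem.List.index? l i with
    | some pos => PySem.List.insert l (pos : Int) i
    | none => l   -- unreachable: count l i ≠ 0 means i ∈ l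

def getMerge (list1 : List Int) (list2 : List Int) : List Int :=
  list2.foldl getMergeStep list1

-- ===== PORT B =====
def getMerge_alt (list1 : List Int) (list2 : List Int) : List Int :=
  -- cnt[v] = cnt.get(v, 0) + 1 over list2
  let cnt : PySem.Dict Int Int :=
    list2.foldl (fun d v => d.insert v (d.getD v 0 + 1)) PySem.Dict.empty
  let in1 : PySem.Set Int := PySem.Set.ofList list1
  -- first loop: rebuild list1, extras before each first occurrence
  let st1 : List Int × PySem.Set Int :=
    list1.foldl (fun st x =>
      if st.2.contains x then (st.1 ++ [x], st.2)
      else (st.1 ++ PySem.List.pyRepeat [x] (cnt.getD x 0) ++ [x], PySem.Set.add st.2 x))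
      ([], PySem.Set.empty)
  -- second loop: blocks for values new to list1, in first-appearance order
  -- (cnt[v] cannot raise KeyError here: v ∈ list2, so getD's default is never used)
  let st2 : List Int × PySem.Set Int :=
    list2.foldl (fun st v =>
      if !(in1.contains v) && !(st.2.contains v) then
        (st.1 ++ PySem.List.pyRepeat [v] (cnt.getD v 0), PySem.Set.add st.2 v)
      else st) (st1.1, PySem.Set.empty)
  st2.1

-- ===== PRECONDITION & SPEC =====
def Spec_getMerge (list1 : List Int) (list2 : List Int) (out : List Int) : Prop := out = getMerge_alt list1 list2
instance (list1 : List Int) (list2 : List Int) (out : List Int) : Decidable (Spec_getMerge list1 list2 out) := by unfold Spec_getMerge; infer_instance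

-- ===== CLAIM (what is proved, stated in full; the proofs are below) =====
def Claim_equal_getMerge : Prop := ∀ (list1 : List Int) (list2 : List Int), Dom_getMerge list1 list2 → Spec_getMerge list1 list2 (getMerge list1 list2)

-- ===== LEMMAS AND PROOFS =====

-- "insert a copy of i before its first occurrence, or at the end": A's loop body.
def insFirst (i : Int) : List Int → List Int
  | [] => [i]
  | x :: xs => if x = i then i :: x :: xs else x :: insFirst i xs

-- expandM c seen l : l with (c x) extra copies before each first occurrence (w.r.t. seen)
def expandM (c : Int → Nat) : List Int → List Int → List Int
  | _, [] => []
  | seen, x :: xs =>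
      if x ∈ seen then x :: expandM c seen xs
      else List.replicate (c x) x ++ x :: expandM c (x :: seen) xs

-- newsM l1 seen l2 : first occurrences in l2 of values outside l1 and seen
def newsM (l1 : List Int) : List Int → List Int → List Int
  | _, [] => []
  | seen, v :: vs =>
      if v ∈ l1 ∨ v ∈ seen then newsM l1 seen vs
      else v :: newsM l1 (v :: seen) vs

def bump (c : Int → Nat) (i : Int) : Int → Nat := fun v => if v = i then c v + 1 else c v

def M (l1 l2 : List Int) : List Int :=
  expandM (fun v => l2.count v) [] l1
    ++ (newsM l1 [] l2).flatMap (fun v => List.replicate (l2.count v) v)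

theorem insFirst_of_not_mem {i : Int} {l : List Int} (h : i ∉ l) : insFirst i l = l ++ [i] := by
  induction l with
  | nil => rfl
  | cons x xs ih =>
      simp only [List.mem_cons, not_or] at h
      simp [insFirst, Ne.symm h.1, ih h.2]

theorem insFirst_append_not_mem {i : Int} {pre suf : List Int} (h : i ∉ pre) :
    insFirst i (pre ++ i :: suf) = pre ++ i :: i :: suf := by
  induction pre with
  | nil => simp [insFirst]
  | cons x xs ih =>
      simp only [List.mem_cons, not_or] at h
      simp [insFirst, Ne.symm h.1, ih h.2]

theorem step_eq (l : List Int) (i : Int) : getMergeStep l i = insFirst i l := by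
  unfold getMergeStep
  by_cases hm : i ∈ l
  · rw [if_neg]
    · rcases (PySem.List.index?_isSome_iff l i).mpr hm with h
      rcases Option.isSome_iff_exists.mp h with ⟨k, hk⟩
      rcases (PySem.List.index?_eq_some_iff l i k).mp hk with ⟨pre, suf, hsplit, hlen, hnot⟩
      rw [hk]
      show PySem.List.insert l (k : Int) i = insFirst i l
      have hle : k ≤ l.length := by
        subst hsplit; subst hlen; simp
      rw [PySem.List.insert_natCast l k i hle, hsplit, ← hlen]
      rw [List.take_left' rfl, List.drop_left' rfl]
      rw [insFirst_append_not_mem hnot]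
    · simp [PySem.List.count_eq, List.count_eq_zero, hm]
  · rw [if_pos, insFirst_of_not_mem hm]
    simp [PySem.List.count_eq, List.count_eq_zero, hm]

theorem mem_expandM {c : Int → Nat} {a : Int} : ∀ {seen l : List Int},
    a ∈ expandM c seen l ↔ a ∈ l := by
  intro seen l
  induction l generalizing seen with
  | nil => simp [expandM]
  | cons x xs ih =>
      by_cases hx : x ∈ seen
      · simp [expandM, hx, ih]
      · simp only [expandM, if_neg hx, List.mem_append, List.mem_cons,
          List.mem_replicate, ih]
        tauto

theorem expandM_congr_c {c c' : Int → Nat} : ∀ {seen l : List Int},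
    (∀ x ∈ l, x ∉ seen → c x = c' x) → expandM c seen l = expandM c' seen l := by
  intro seen l
  induction l generalizing seen with
  | nil => intro _; rfl
  | cons x xs ih =>
      intro h
      by_cases hx : x ∈ seen
      · simp only [expandM, if_pos hx]
        rw [ih (fun y hy hys => h y (List.mem_cons_of_mem _ hy) hys)]
      · simp only [expandM, if_neg hx]
        rw [h x (List.mem_cons_self) hx,
          ih (fun y hy hys => h y (List.mem_cons_of_mem _ hy)
            (fun hc => hys (List.mem_cons_of_mem _ hc)))]

theorem expandM_congr_seen {c : Int → Nat} : ∀ {seen seen' l : List Int},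
    (∀ x, x ∈ seen ↔ x ∈ seen') → expandM c seen l = expandM c seen' l := by
  intro seen seen' l
  induction l generalizing seen seen' with
  | nil => intro _; rfl
  | cons x xs ih =>
      intro h
      by_cases hx : x ∈ seen
      · simp only [expandM, if_pos hx, if_pos ((h x).mp hx)]
        rw [ih h]
      · simp only [expandM, if_neg hx, if_neg (fun hc => hx ((h x).mpr hc))]
        rw [ih (seen := x :: seen) (seen' := x :: seen')
          (fun y => by simp [h y])]

theorem expandM_zero : ∀ {seen l : List Int}, expandM (fun _ => 0) seen l = l := by
  intro seen l
  induction l generalizing seen with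
  | nil => rfl
  | cons x xs ih => by_cases hx : x ∈ seen <;> simp [expandM, hx, ih]

theorem insFirst_append_left {i : Int} {a : List Int} (b : List Int) (h : i ∈ a) :
    insFirst i (a ++ b) = insFirst i a ++ b := by
  induction a with
  | nil => cases h
  | cons x xs ih =>
      by_cases hx : x = i
      · simp [insFirst, hx]
      · have : i ∈ xs := (List.mem_cons.mp h).resolve_left (fun he => hx he.symm)
        simp [insFirst, hx, ih this]

theorem insFirst_append_right {i : Int} {a : List Int} (b : List Int) (h : i ∉ a) :
    insFirst i (a ++ b) = a ++ insFirst i b := by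
  induction a with
  | nil => rfl
  | cons x xs ih =>
      simp only [List.mem_cons, not_or] at h
      simp [insFirst, Ne.symm h.1, ih h.2]

theorem insFirst_expandM {c : Int → Nat} {i : Int} : ∀ {seen l : List Int},
    i ∈ l → i ∉ seen → insFirst i (expandM c seen l) = expandM (bump c i) seen l := by
  intro seen l
  induction l generalizing seen with
  | nil => intro h; cases h
  | cons x xs ih =>
      intro hil his
      by_cases hx : x ∈ seen
      · have hxi : x ≠ i := fun he => his (he ▸ hx)
        have hixs : i ∈ xs := (List.mem_cons.mp hil).resolve_left (fun he => hxi he.symm)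
        simp only [expandM, if_pos hx]
        rw [show insFirst i (x :: expandM c seen xs) = x :: insFirst i (expandM c seen xs) by
          simp [insFirst, hxi], ih hixs his]
      · by_cases hxi : x = i
        · subst hxi
          simp only [expandM, if_neg hx]
          have h1 : insFirst x (List.replicate (c x) x ++ x :: expandM c (x :: seen) xs)
              = x :: List.replicate (c x) x ++ x :: expandM c (x :: seen) xs := by
            cases hc : c x with
            | zero => simp [insFirst]
            | succ n => simp [List.replicate_succ, insFirst]
          rw [h1]
          have h2 : expandM (bump c x) (x :: seen) xs = expandM c (x :: seen) xs := by
            apply expandM_congr_c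
            intro y _ hy
            simp only [List.mem_cons, not_or] at hy
            simp [bump, hy.1]
          simp [bump, h2, List.replicate_succ]
        · have hixs : i ∈ xs := (List.mem_cons.mp hil).resolve_left (fun he => hxi he.symm)
          simp only [expandM, if_neg hx]
          rw [insFirst_append_right _ (by
            intro hc; exact hxi (List.eq_of_mem_replicate hc).symm)]
          rw [show insFirst i (x :: expandM c (x :: seen) xs)
              = x :: insFirst i (expandM c (x :: seen) xs) by simp [insFirst, hxi]]
          rw [ih hixs (by simp [his, Ne.symm hxi])]
          simp [bump, hxi]

theorem mem_newsM {l1 : List Int} {a : Int} : ∀ {seen l2 : List Int},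
    a ∈ newsM l1 seen l2 ↔ a ∈ l2 ∧ a ∉ l1 ∧ a ∉ seen := by
  intro seen l2
  induction l2 generalizing seen with
  | nil => simp [newsM]
  | cons v vs ih =>
      by_cases hv : v ∈ l1 ∨ v ∈ seen
      · rw [newsM, if_pos hv, ih]
        constructor
        · rintro ⟨h1, h2, h3⟩; exact ⟨List.mem_cons_of_mem _ h1, h2, h3⟩
        · rintro ⟨h1, h2, h3⟩
          refine ⟨?_, h2, h3⟩
          rcases List.mem_cons.mp h1 with he | h1
          · subst he
            rcases hv with h | h
            · exact absurd h h2
            · exact absurd h h3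
          · exact h1
      · rw [newsM, if_neg hv, List.mem_cons, ih]
        rw [not_or] at hv
        constructor
        · rintro (he | ⟨h1, h2, h3⟩)
          · subst he; exact ⟨List.mem_cons_self, hv.1, hv.2⟩
          · rw [List.mem_cons, not_or] at h3
            exact ⟨List.mem_cons_of_mem _ h1, h2, h3.2⟩
        · rintro ⟨h1, h2, h3⟩
          rcases List.mem_cons.mp h1 with he | h1
          · exact Or.inl he
          · by_cases hav : a = v
            · exact Or.inl hav
            · exact Or.inr ⟨h1, h2, by simp [List.mem_cons, hav, h3]⟩

theorem nodup_newsM {l1 : List Int} : ∀ {seen l2 : List Int}, (newsM l1 seen l2).Nodup := by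
  intro seen l2
  induction l2 generalizing seen with
  | nil => simp [newsM]
  | cons v vs ih =>
      by_cases hv : v ∈ l1 ∨ v ∈ seen
      · simpa [newsM, hv] using ih
      · rw [newsM, if_neg hv, List.nodup_cons]
        refine ⟨fun hc => ?_, ih⟩
        exact (mem_newsM.mp hc).2.2 List.mem_cons_self

theorem newsM_congr_seen {l1 : List Int} : ∀ {seen seen' l2 : List Int},
    (∀ x, x ∈ seen ↔ x ∈ seen') → newsM l1 seen l2 = newsM l1 seen' l2 := by
  intro seen seen' l2
  induction l2 generalizing seen seen' with
  | nil => intro _; rfl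
  | cons v vs ih =>
      intro h
      by_cases hv : v ∈ l1 ∨ v ∈ seen
      · rw [newsM, if_pos hv, newsM,
          if_pos (by rcases hv with h' | h'; exact Or.inl h'; exact Or.inr ((h v).mp h')), ih h]
      · rw [newsM, if_neg hv, newsM, if_neg (by
          rw [not_or] at hv ⊢; exact ⟨hv.1, fun hc => hv.2 ((h v).mpr hc)⟩)]
        rw [ih (seen := v :: seen) (seen' := v :: seen') (fun y => by simp [h y])]

theorem newsM_append_one (l1 : List Int) (i : Int) : ∀ (seen vs : List Int),
    newsM l1 seen (vs ++ [i])
      = newsM l1 seen vs ++ (if i ∈ l1 ∨ i ∈ seen ∨ i ∈ vs then [] else [i]) := by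
  intro seen vs
  induction vs generalizing seen with
  | nil =>
      by_cases h : i ∈ l1 ∨ i ∈ seen
      · rcases h with h | h <;> simp [newsM, h]
      · rw [not_or] at h
        simp [newsM, h.1, h.2]
  | cons v vs' ih =>
      by_cases hv : v ∈ l1 ∨ v ∈ seen
      · rw [List.cons_append, newsM, if_pos hv, newsM, if_pos hv, ih]
        congr 1
        have hcond : (i ∈ l1 ∨ i ∈ seen ∨ i ∈ vs') ↔ (i ∈ l1 ∨ i ∈ seen ∨ i ∈ v :: vs') := by
          by_cases hiv : i = v
          · subst hiv
            rcases hv with h | h <;> simp [h]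
          · simp [List.mem_cons, hiv]
        rw [if_congr hcond rfl rfl]
      · rw [List.cons_append, newsM, if_neg hv, newsM, if_neg hv, ih, List.cons_append]
        congr 2
        have hcond : (i ∈ l1 ∨ i ∈ v :: seen ∨ i ∈ vs') ↔ (i ∈ l1 ∨ i ∈ seen ∨ i ∈ v :: vs') := by
          simp only [List.mem_cons]
          tauto
        rw [if_congr hcond rfl rfl]

theorem flatMap_congr' {f g : Int → List Int} : ∀ {l : List Int},
    (∀ x ∈ l, f x = g x) → l.flatMap f = l.flatMap g := by
  intro l
  induction l with
  | nil => intro _; rfl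
  | cons x xs ih =>
      intro h
      simp only [List.flatMap_cons, h x List.mem_cons_self,
        ih (fun y hy => h y (List.mem_cons_of_mem _ hy))]

theorem insFirst_flatMap_blocks {c : Int → Nat} {i : Int} {ns : List Int}
    (hnd : ns.Nodup) (hmem : i ∈ ns) (hpos : 0 < c i) :
    insFirst i (ns.flatMap (fun v => List.replicate (c v) v))
      = ns.flatMap (fun v => List.replicate (bump c i v) v) := by
  rcases List.append_of_mem hmem with ⟨p, s, rfl⟩
  have hni : i ∉ p ++ s := (List.nodup_cons.mp (List.nodup_middle.mp hnd)).1
  have hnp : i ∉ p := fun hc => hni (List.mem_append_left _ hc)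
  have hns : i ∉ s := fun hc => hni (List.mem_append_right _ hc)
  rw [List.flatMap_append, List.flatMap_cons]
  rw [insFirst_append_right _ (by
    intro hc
    rcases List.mem_flatMap.mp hc with ⟨v, hv, hrv⟩
    exact hnp ((List.eq_of_mem_replicate hrv) ▸ hv))]
  have h1 : insFirst i (List.replicate (c i) i ++ s.flatMap (fun v => List.replicate (c v) v))
      = List.replicate (c i + 1) i ++ s.flatMap (fun v => List.replicate (c v) v) := by
    cases hc : c i with
    | zero => omega
    | succ n => simp [List.replicate_succ, insFirst]
  rw [h1, List.flatMap_append, List.flatMap_cons]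
  rw [flatMap_congr' (g := fun v => List.replicate (bump c i v) v)
      (fun v hv => by
        have : v ≠ i := fun he => hnp (he ▸ hv)
        simp [bump, this]),
    flatMap_congr' (l := s) (f := fun v => List.replicate (c v) v)
      (g := fun v => List.replicate (bump c i v) v)
      (fun v hv => by
        have : v ≠ i := fun he => hns (he ▸ hv)
        simp [bump, this])]
  simp [bump]

theorem count_append_one (l2 : List Int) (i : Int) :
    (fun v => (l2 ++ [i]).count v) = bump (fun v => l2.count v) i := by
  funext v
  by_cases h : v = i
  · subst h; simp [bump, List.count_append]
  · have h' : ¬ i = v := fun he => h he.symm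
    simp [bump, h, h', List.count_append]

-- ===== A-side: getMerge l1 l2 = M l1 l2 =====
theorem getMerge_eq_M (l1 l2 : List Int) : getMerge l1 l2 = M l1 l2 := by
  induction l2 using List.reverseRecOn with
  | nil => simp [getMerge, M, newsM, expandM_zero]
  | append_singleton l2 i ih =>
      rw [getMerge, List.foldl_append, List.foldl_cons, List.foldl_nil, ← getMerge, ih,
        step_eq]
      unfold M
      rw [count_append_one l2 i]
      by_cases h1 : i ∈ l1
      · rw [newsM_append_one, if_pos (Or.inl h1), List.append_nil]
        rw [insFirst_append_left _ (mem_expandM.mpr h1),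
          insFirst_expandM h1 (List.not_mem_nil)]
        congr 1
        apply flatMap_congr'
        intro v hv
        have hvi : v ≠ i := fun he => (mem_newsM.mp hv).2.1 (he ▸ h1)
        have hiv : ¬ i = v := fun he => hvi he.symm
        simp [List.count_append, hiv]
      · rw [expandM_congr_c (c := bump (fun v => l2.count v) i) (c' := fun v => l2.count v)
          (fun x hx _ => by
            have : x ≠ i := fun he => h1 (he ▸ hx)
            simp [bump, this])]
        rw [insFirst_append_right _ (fun hc => h1 (mem_expandM.mp hc))]
        by_cases h2 : i ∈ l2
        · rw [newsM_append_one, if_pos (Or.inr (Or.inr h2)), List.append_nil]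
          congr 1
          rw [insFirst_flatMap_blocks nodup_newsM
            (mem_newsM.mpr ⟨h2, h1, List.not_mem_nil⟩) (List.count_pos_iff.mpr h2)]
          apply flatMap_congr'
          intro v hv
          by_cases hvi : v = i
          · subst hvi; simp [bump, List.count_append]
          · have hiv : ¬ i = v := fun he => hvi he.symm
            simp [bump, hvi, hiv, List.count_append]
        · rw [newsM_append_one,
            if_neg (by rw [not_or, not_or]; exact ⟨h1, List.not_mem_nil, h2⟩)]
          rw [insFirst_of_not_mem (by
            intro hc
            rcases List.mem_flatMap.mp hc with ⟨v, hv, hrv⟩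
            exact h2 ((List.eq_of_mem_replicate hrv) ▸ (mem_newsM.mp hv).1))]
          rw [List.flatMap_append, List.flatMap_cons, List.flatMap_nil]
          have hci : l2.count i = 0 := List.count_eq_zero.mpr h2
          simp [List.count_append, List.count_cons, hci, List.replicate_succ]
          exact flatMap_congr' (fun v hv => by
            have hiv : ¬ i = v := fun he => h2 (by rw [he]; exact (mem_newsM.mp hv).1)
            simp [hiv])

-- ===== B-side: getMerge_alt l1 l2 = M l1 l2 =====

theorem set_contains_iff (s : PySem.Set Int) (x : Int) :
    PySem.Set.contains s x = true ↔ x ∈ s := by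
  simp [PySem.Set.contains]

theorem loop1_eq (c : Int → Nat) : ∀ (l : List Int) (acc : List Int) (s : PySem.Set Int),
    (l.foldl (fun st x =>
        if st.2.contains x then (st.1 ++ [x], st.2)
        else (st.1 ++ List.replicate (c x) x ++ [x], PySem.Set.add st.2 x))
      (acc, s)).1 = acc ++ expandM c s l := by
  intro l
  induction l with
  | nil => intro acc s; simp [expandM]
  | cons x xs ih =>
      intro acc s
      rw [List.foldl_cons]
      by_cases hx : x ∈ s
      · rw [if_pos ((set_contains_iff s x).mpr hx)]
        rw [ih, expandM, if_pos hx, List.append_assoc]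
        rfl
      · rw [if_neg (fun hc => hx ((set_contains_iff s x).mp hc))]
        rw [ih, expandM, if_neg hx]
        rw [expandM_congr_seen (seen := PySem.Set.add s x) (seen' := x :: s)
          (fun y => by rw [PySem.Set.mem_add]; simp [or_comm])]
        simp [List.append_assoc]

theorem loop2_eq (c : Int → Nat) (l1 : List Int) (in1 : PySem.Set Int)
    (hin1 : ∀ y, y ∈ in1 ↔ y ∈ l1) : ∀ (l : List Int) (acc : List Int) (s : PySem.Set Int),
    (l.foldl (fun st v =>
        if !(in1.contains v) && !(st.2.contains v) then
          (st.1 ++ List.replicate (c v) v, PySem.Set.add st.2 v)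
        else st)
      (acc, s)).1 = acc ++ (newsM l1 s l).flatMap (fun v => List.replicate (c v) v) := by
  intro l
  induction l with
  | nil => intro acc s; simp [newsM]
  | cons v vs ih =>
      intro acc s
      rw [List.foldl_cons]
      by_cases hv : v ∈ l1 ∨ v ∈ s
      · rw [if_neg (fun hc => by
          rw [Bool.and_eq_true, Bool.not_eq_true', Bool.not_eq_true'] at hc
          rcases hv with h | h
          · have ht := (set_contains_iff in1 v).mpr ((hin1 v).mpr h)
            rw [hc.1] at ht
            exact Bool.false_ne_true ht
          · have ht := (set_contains_iff s v).mpr h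
            rw [hc.2] at ht
            exact Bool.false_ne_true ht)]
        rw [ih, newsM, if_pos hv]
      · rw [not_or] at hv
        rw [if_pos (by
          rw [Bool.and_eq_true, Bool.not_eq_true', Bool.not_eq_true']
          constructor
          · cases hb : PySem.Set.contains in1 v with
            | false => rfl
            | true => exact absurd ((hin1 v).mp ((set_contains_iff in1 v).mp hb)) hv.1
          · cases hb : PySem.Set.contains s v with
            | false => rfl
            | true => exact absurd ((set_contains_iff s v).mp hb) hv.2)]
        rw [ih, newsM, if_neg (by rw [not_or]; exact hv)]
        rw [newsM_congr_seen (seen := PySem.Set.add s v) (seen' := v :: s)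
          (fun y => by rw [PySem.Set.mem_add]; simp [or_comm])]
        simp [List.append_assoc]

theorem getMerge_alt_eq_M (l1 l2 : List Int) : getMerge_alt l1 l2 = M l1 l2 := by
  unfold getMerge_alt
  simp only [PySem.Dict.foldl_insert_getD_add_one_eq_counter,
    PySem.List.pyRepeat_singleton, PySem.Dict.getD_counter, Int.toNat_natCast]
  rw [loop1_eq (fun v => l2.count v) l1 [] PySem.Set.empty]
  rw [loop2_eq (fun v => l2.count v) l1 (PySem.Set.ofList l1)
    (fun y => PySem.Set.mem_ofList l1 y) l2 _ PySem.Set.empty]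
  rw [List.nil_append, M]
  rfl

-- ===== VERDICT (by name: the statement is the Claim_ definition above) =====
theorem getMerge_spec : Claim_equal_getMerge := by
  intro l1 l2 _
  unfold Spec_getMerge
  rw [getMerge_eq_M, getMerge_alt_eq_M]
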